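-- pv_equiv track=rewrite | github.com/xknt21/PBL2 | src/test_dir.py | map_class_to_grade
-- ===== SOURCE A (Python) =====
-- def map_class_to_grade(predicted_class):
--     # Mapping rules in directory names:
--     # 0-2 -> Grade 1
--     # 3-4 -> Grade 2
--     # 5-6 -> Grade 3
--     # 7-9 -> Grade 4
--
--     grade_mapping = {
--         1: range(0, 3),  # 0, 1, 2
--         2: range(3, 5),  # 3, 4
--         3: range(5, 7),  # 5, 6
--         4: range(7, 10)  # 7, 8, 9
--     }
--
--
--     for grade, class_range in grade_mapping.items():
--         if predicted_class in class_range: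
--             return grade
--     return -1  # Default fallback for unexpected values
-- ===== SOURCE B (Python) =====
-- _GRADE_TABLE = {0: 1, 1: 1, 2: 1, 3: 2, 4: 2, 5: 3, 6: 3, 7: 4, 8: 4, 9: 4}
--
-- def map_class_to_grade(predicted_class):
--     return _GRADE_TABLE.get(predicted_class, -1)
-- ===== Notes on version B (the rewrite author's own statement) =====
-- stated objective: simpler
-- what changed: Replaced the per-grade loop over range objects with a single prebuilt class->grade lookup table queried once with .get(..., -1).
import Mathlib
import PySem

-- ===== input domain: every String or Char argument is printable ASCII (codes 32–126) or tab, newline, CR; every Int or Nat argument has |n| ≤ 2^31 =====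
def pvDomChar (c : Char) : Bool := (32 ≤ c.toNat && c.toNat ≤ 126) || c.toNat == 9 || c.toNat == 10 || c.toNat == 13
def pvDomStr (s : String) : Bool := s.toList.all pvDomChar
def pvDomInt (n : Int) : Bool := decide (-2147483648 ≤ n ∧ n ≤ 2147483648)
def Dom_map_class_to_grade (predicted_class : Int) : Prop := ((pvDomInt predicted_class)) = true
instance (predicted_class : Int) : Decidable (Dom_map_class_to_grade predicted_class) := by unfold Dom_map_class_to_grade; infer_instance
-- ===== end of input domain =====

-- ===== PORT A =====
-- header: B replaces A's loop over (grade, range) pairs with one prebuilt class->grade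
-- association-table lookup with default -1 (objective: simpler).
-- Port of A: iterate grade_mapping.items() in insertion order; 'x in range(a,b)' is a ≤ x < b.
def map_class_to_grade (predicted_class : Int) : Int :=
  if 0 ≤ predicted_class ∧ predicted_class < 3 then 1
  else if 3 ≤ predicted_class ∧ predicted_class < 5 then 2
  else if 5 ≤ predicted_class ∧ predicted_class < 7 then 3
  else if 7 ≤ predicted_class ∧ predicted_class < 10 then 4
  else -1

-- ===== PORT B =====
-- Port of B: the literal lookup table, queried once with default -1.
def pvGradeTable : PySem.Dict Int Int :=
  PySem.Dict.ofList [(0,1),(1,1),(2,1),(3,2),(4,2),(5,3),(6,3),(7,4),(8,4),(9,4)]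

def map_class_to_grade_alt (predicted_class : Int) : Int :=
  pvGradeTable.getD predicted_class (-1)

-- ===== PRECONDITION & SPEC =====
def Spec_map_class_to_grade (predicted_class : Int) (out : Int) : Prop := out = map_class_to_grade_alt predicted_class
instance (predicted_class : Int) (out : Int) : Decidable (Spec_map_class_to_grade predicted_class out) := by unfold Spec_map_class_to_grade; infer_instance

-- ===== CLAIM (what is proved, stated in full; the proofs are below) =====
def Claim_equal_map_class_to_grade : Prop := ∀ (predicted_class : Int), Dom_map_class_to_grade predicted_class → Spec_map_class_to_grade predicted_class (map_class_to_grade predicted_class)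

-- ===== LEMMAS AND PROOFS =====

-- ===== VERDICT (by name: the statement is the Claim_ definition above) =====
theorem map_class_to_grade_spec : Claim_equal_map_class_to_grade := by
  intro x _
  unfold Spec_map_class_to_grade
  by_cases h : 0 ≤ x ∧ x < 10
  · obtain ⟨h1, h2⟩ := h
    interval_cases x <;> decide
  · have ha : map_class_to_grade x = -1 := by
      unfold map_class_to_grade; split_ifs <;> omega
    have hb : map_class_to_grade_alt x = -1 := by
      unfold map_class_to_grade_alt
      have hk : pvGradeTable.keys = [0, 1, 2, 3, 4, 5, 6, 7, 8, 9] := by decide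
      have hc : pvGradeTable.contains x = false := by
        rw [PySem.Dict.contains_eq_decide_mem_keys, hk]
        simp only [decide_eq_false_iff_not, List.mem_cons, List.not_mem_nil, or_false]
        omega
      exact PySem.Dict.getD_of_not_contains _ _ hc
    rw [ha, hb]
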